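-- pv_equiv track=rewrite | github.com/xenord/web-intelligence | SecondaConsegna/Codice/apriori.py | getItemSetValue
-- ===== SOURCE A (Python) =====
-- def getItemSetValue(itemset,itemsetCollection):
--     count = 0
--     for everyItemSet in itemsetCollection:
--         length = len(itemset)
--         orgLen = len(itemset)
--         index = 0
--         length2 = 0
--         while length > 0:
--             if everyItemSet.count(itemset[index]) >= 1:
--                 length2 = length2 + 1
--             length = length -1
--             index = index + 1
--         if length2 == orgLen:
--             count = count + 1
--     return count
-- ===== SOURCE B (Python) =====
-- def getItemSetValue(itemset, itemsetCollection):
--     # Inverted index: element -> set of indices of collections containing it.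
--     index = {}
--     for i, collection in enumerate(itemsetCollection):
--         for item in collection:
--             index.setdefault(item, set()).add(i)
--     surviving = set(range(len(itemsetCollection)))
--     for item in itemset:
--         surviving = surviving & index.get(item, set())
--     return len(surviving)
-- ===== Notes on version B (the rewrite author's own statement) =====
-- stated objective: faster
-- what changed: Replaces the per-collection while-loop that rescans each collection with .count() for every item by a one-pass inverted index (element -> set of collection indices) whose index-sets are intersected over the itemset.
import Mathlib
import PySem

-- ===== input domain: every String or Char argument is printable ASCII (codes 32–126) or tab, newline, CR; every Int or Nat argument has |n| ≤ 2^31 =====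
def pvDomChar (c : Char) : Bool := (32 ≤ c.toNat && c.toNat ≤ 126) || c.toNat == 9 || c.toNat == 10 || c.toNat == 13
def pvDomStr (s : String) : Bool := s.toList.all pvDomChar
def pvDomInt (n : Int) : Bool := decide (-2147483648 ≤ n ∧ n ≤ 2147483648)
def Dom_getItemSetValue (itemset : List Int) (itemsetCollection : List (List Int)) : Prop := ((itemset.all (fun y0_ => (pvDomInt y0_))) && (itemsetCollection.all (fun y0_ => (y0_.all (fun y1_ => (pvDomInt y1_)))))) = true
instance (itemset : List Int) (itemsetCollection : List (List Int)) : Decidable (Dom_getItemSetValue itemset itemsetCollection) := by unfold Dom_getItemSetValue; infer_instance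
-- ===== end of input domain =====

-- B replaces A's per-collection rescans (.count per item) with a one-pass inverted index
-- (element -> set of collection indices) intersected over the itemset; objective: faster.

-- ===== PORT A =====
-- A's inner while loop: fuel = the decremented 'length', with 'index' and 'length2' as in the Python.
-- itemset[index] is ported as pyGetD with default 0: the loop only reads indices 0..len(itemset)-1,
-- which are always in range, so the default is never used.
def pvWhileA (itemset everyItemSet : List Int) : Nat → Int → Int → Int
  | 0, _, length2 => length2
  | Nat.succ k, index, length2 =>
    pvWhileA itemset everyItemSet k (index + 1)
      (if 1 ≤ PySem.List.count everyItemSet (PySem.List.pyGetD itemset index 0) then length2 + 1 else length2)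

def getItemSetValue (itemset : List Int) (itemsetCollection : List (List Int)) : Int :=
  itemsetCollection.foldl (fun count everyItemSet =>
    let orgLen := PySem.List.len itemset
    let length2 := pvWhileA itemset everyItemSet itemset.length 0 0
    if length2 = orgLen then count + 1 else count) 0

-- ===== PORT B =====
-- index.setdefault(item, set()).add(i) is ported functionally as insert of (getD ∪ {i}).
def pvBuildIndex (itemsetCollection : List (List Int)) : PySem.Dict Int (PySem.Set Int) :=
  (PySem.List.enumerate itemsetCollection 0).foldl
    (fun index p => p.2.foldl
      (fun index item => index.insert item (PySem.Set.add (index.getD item PySem.Set.empty) p.1)) index)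
    PySem.Dict.empty

-- surviving & s is PySem.Set.inter; only the SIZE of surviving is returned, so Python's
-- unspecified set iteration order is never observed.
def getItemSetValue_alt (itemset : List Int) (itemsetCollection : List (List Int)) : Int :=
  let index := pvBuildIndex itemsetCollection
  let surviving := itemset.foldl
    (fun surviving item => PySem.Set.inter surviving (index.getD item PySem.Set.empty))
    (PySem.Set.ofList (PySem.List.pyRange 0 (PySem.List.len itemsetCollection) 1))
  PySem.Set.len surviving

-- ===== PRECONDITION & SPEC =====
def Spec_getItemSetValue (itemset : List Int) (itemsetCollection : List (List Int)) (out : Int) : Prop := out = getItemSetValue_alt itemset itemsetCollection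
instance (itemset : List Int) (itemsetCollection : List (List Int)) (out : Int) : Decidable (Spec_getItemSetValue itemset itemsetCollection out) := by unfold Spec_getItemSetValue; infer_instance

-- ===== CLAIM (what is proved, stated in full; the proofs are below) =====
def Claim_equal_getItemSetValue : Prop := ∀ (itemset : List Int) (itemsetCollection : List (List Int)), Dom_getItemSetValue itemset itemsetCollection → Spec_getItemSetValue itemset itemsetCollection (getItemSetValue itemset itemsetCollection)

-- ===== LEMMAS AND PROOFS =====

-- the common value both programs compute
def pvKey (itemset : List Int) (c : List Int) : Bool := itemset.all (fun x => decide (x ∈ c))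

-- ---- A side ----
theorem pvWhileA_spec (c itemset : List Int) :
    ∀ (rest : List Int) (j : Nat) (l2 : Int), itemset.drop j = rest →
      pvWhileA itemset c rest.length (j : Int) l2
        = l2 + (rest.countP (fun x => decide (1 ≤ PySem.List.count c x)) : Int) := by
  intro rest
  induction rest with
  | nil => intro j l2 _; simp [pvWhileA]
  | cons x r ih =>
    intro j l2 h
    have hget : PySem.List.pyGetD itemset (j : Int) 0 = x := by
      rw [PySem.List.pyGetD_natCast]
      rw [List.getD_eq_getElem?_getD, ← List.head?_drop, h]
      rfl
    have hdrop : itemset.drop (j + 1) = r := by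
      rw [← List.tail_drop, h]
      rfl
    have hrec := ih (j + 1) (if 1 ≤ PySem.List.count c x then l2 + 1 else l2) hdrop
    show pvWhileA itemset c (r.length + 1) (j : Int) l2 = _
    rw [pvWhileA, hget]
    push_cast at hrec ⊢
    rw [hrec, List.countP_cons]
    by_cases hx : 1 ≤ PySem.List.count c x <;>
      simp only [hx, if_true, if_false, decide_eq_true_eq] <;> push_cast <;> omega

theorem getItemSetValue_eq_countP (itemset : List Int) (cs : List (List Int)) :
    getItemSetValue itemset cs = (cs.countP (pvKey itemset) : Int) := by
  unfold getItemSetValue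
  simp only []
  rw [PySem.List.foldl_ite_add_one
    (fun c => pvWhileA itemset c itemset.length 0 0 = PySem.List.len itemset) cs 0]
  rw [zero_add]
  congr 1
  apply List.countP_congr
  intro c _
  have h0 : pvWhileA itemset c itemset.length ((0 : Nat) : Int) 0
      = 0 + (itemset.countP (fun x => decide (1 ≤ PySem.List.count c x)) : Int) :=
    pvWhileA_spec c itemset itemset 0 0 (by simp)
  simp only [Nat.cast_zero] at h0
  have hiff : (pvWhileA itemset c itemset.length 0 0 = PySem.List.len itemset)
      ↔ (pvKey itemset c = true) := by
    rw [h0, zero_add, PySem.List.len_eq, Nat.cast_inj, List.countP_eq_length]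
    unfold pvKey
    rw [List.all_eq_true]
    constructor
    · intro hall y hy
      have hc := hall y hy
      simp only [decide_eq_true_eq, PySem.List.count_eq] at hc ⊢
      exact List.count_pos_iff.mp (by omega)
    · intro hall y hy
      have hc := hall y hy
      simp only [decide_eq_true_eq] at hc ⊢
      rw [PySem.List.count_eq]
      have := List.count_pos_iff.mpr hc
      omega
  rw [decide_eq_true_eq]
  exact hiff

-- ---- B side ----
theorem pv_inner_mem (coll : List Int) :
    ∀ (d : PySem.Dict Int (PySem.Set Int)) (j x i : Int),
      i ∈ (coll.foldl (fun d item => d.insert item (PySem.Set.add (d.getD item PySem.Set.empty) j)) d).getD x PySem.Set.empty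
        ↔ i ∈ d.getD x PySem.Set.empty ∨ (x ∈ coll ∧ i = j) := by
  induction coll with
  | nil => intro d j x i; simp
  | cons c rest ih =>
    intro d j x i
    rw [List.foldl_cons, ih]
    by_cases hxc : x = c
    · subst hxc
      rw [PySem.Dict.getD_insert_self]
      simp only [PySem.Set.mem_add, List.mem_cons]
      tauto
    · rw [PySem.Dict.getD_insert_of_ne _ _ _ hxc]
      simp only [List.mem_cons]
      tauto

theorem pv_outer_mem (cs : List (List Int)) :
    ∀ (s : Int) (d : PySem.Dict Int (PySem.Set Int)) (x i : Int),
      i ∈ ((PySem.List.enumerate cs s).foldl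
            (fun index p => p.2.foldl
              (fun index item => index.insert item (PySem.Set.add (index.getD item PySem.Set.empty) p.1)) index) d).getD x PySem.Set.empty
        ↔ i ∈ d.getD x PySem.Set.empty ∨ ∃ k : Nat, k < cs.length ∧ i = s + k ∧ x ∈ cs.getD k [] := by
  induction cs with
  | nil => intro s d x i; simp [PySem.List.enumerate]
  | cons c rest ih =>
    intro s d x i
    rw [PySem.List.enumerate_cons, List.foldl_cons, ih, pv_inner_mem]
    constructor
    · rintro ((hd | ⟨hxc, hij⟩) | ⟨k, hk, hik, hxk⟩)
      · exact Or.inl hd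
      · refine Or.inr ⟨0, by simp, ?_, by simpa using hxc⟩
        simpa using hij
      · refine Or.inr ⟨k + 1, by simpa using hk, ?_, by simpa using hxk⟩
        push_cast at hik ⊢
        omega
    · rintro (hd | ⟨k, hk, hik, hxk⟩)
      · exact Or.inl (Or.inl hd)
      · cases k with
        | zero =>
          refine Or.inl (Or.inr ⟨by simpa using hxk, ?_⟩)
          simpa using hik
        | succ k' =>
          refine Or.inr ⟨k', by simpa using hk, ?_, by simpa using hxk⟩
          push_cast at hik ⊢
          omega

theorem pvBuildIndex_mem (cs : List (List Int)) (x i : Int) :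
    i ∈ (pvBuildIndex cs).getD x PySem.Set.empty
      ↔ ∃ k : Nat, k < cs.length ∧ i = (k : Int) ∧ x ∈ cs.getD k [] := by
  unfold pvBuildIndex
  rw [pv_outer_mem]
  simp [PySem.Dict.getD_empty, PySem.Set.empty]

theorem pv_interfold (items : List Int) :
    ∀ (f : Int → PySem.Set Int) (init : List Int),
      items.foldl (fun s x => PySem.Set.inter s (f x)) init
        = init.filter (fun i => items.all (fun x => PySem.Set.contains (f x) i)) := by
  induction items with
  | nil => intro f init; simp
  | cons x r ih =>
    intro f init
    rw [List.foldl_cons, ih]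
    show (PySem.Set.inter init (f x)).filter _ = _
    rw [PySem.Set.inter, List.filter_filter]
    apply List.filter_congr
    intro a _
    simp [Bool.and_comm]

theorem pv_countP_range (cs : List (List Int)) (P : List Int → Bool) :
    (List.range cs.length).countP (fun k => P (cs.getD k [])) = cs.countP P := by
  induction cs with
  | nil => simp
  | cons c rest ih =>
    rw [List.length_cons, List.range_succ_eq_map, List.countP_cons, List.countP_map]
    simp only [Function.comp_def, List.getD_cons_succ, List.getD_cons_zero]
    rw [ih, List.countP_cons]

theorem getItemSetValue_alt_eq_countP (itemset : List Int) (cs : List (List Int)) :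
    getItemSetValue_alt itemset cs = (cs.countP (pvKey itemset) : Int) := by
  unfold getItemSetValue_alt
  simp only []
  rw [pv_interfold]
  rw [PySem.Set.ofList_eq_self_of_nodup _ (PySem.List.nodup_pyRange_one 0 (PySem.List.len cs))]
  have hfc : ∀ i ∈ PySem.List.pyRange 0 (PySem.List.len cs) 1,
      (itemset.all fun x => PySem.Set.contains ((pvBuildIndex cs).getD x PySem.Set.empty) i)
        = (itemset.all fun x => decide (x ∈ cs.getD i.toNat [])) := by
    intro i hi
    have hm := (PySem.List.mem_pyRange_one (a := 0) (b := PySem.List.len cs) (x := i)).mp hi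
    rw [PySem.List.len_eq] at hm
    rw [Bool.eq_iff_iff]
    simp only [List.all_eq_true, decide_eq_true_eq, PySem.Set.contains_iff, pvBuildIndex_mem]
    constructor
    · intro hall y hy
      rcases hall y hy with ⟨k, hk, hik, hxk⟩
      have hkk : i.toNat = k := by omega
      rwa [hkk]
    · intro hall y hy
      exact ⟨i.toNat, by omega, by omega, hall y hy⟩
  rw [List.filter_congr hfc]
  rw [PySem.Set.len]
  rw [← List.countP_eq_length_filter]
  have hpr := PySem.List.pyRange_one 0 (PySem.List.len cs)
  rw [hpr, List.countP_map]
  simp only [Function.comp_def, zero_add, Int.toNat_natCast, PySem.List.len_eq, sub_zero]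
  exact_mod_cast pv_countP_range cs (pvKey itemset)

-- ===== VERDICT (by name: the statement is the Claim_ definition above) =====
theorem getItemSetValue_spec : Claim_equal_getItemSetValue := by
  intro itemset cs _
  unfold Spec_getItemSetValue
  rw [getItemSetValue_eq_countP, getItemSetValue_alt_eq_countP]
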